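-- pv_equiv track=rewrite | github.com/samueldbt/trabajo_de_clase_fundamentos | poker.py | contar_repetidos
-- ===== SOURCE A (Python) =====
-- def contar_repetidos(mano): #esto se usa en la funcion de evaluar_mano no en la principal (juego)
--     contador = []
--     for carta in mano:
--         existe = False #asume que la carta no se ha contado
--         for i in range(len(contador)):
--             if contador[i][0] == carta[0]:
--                 contador[i][1] += 1 #se dice que tiene la carta y se suma al numero de veces que ya habia salido la carta
--                 existe = True
--         if not existe:
--             contador.append([carta[0], 1])
--     return contador #esto es util para saber si se tiene trios o pares o full houses y asi
-- ===== SOURCE B (Python) =====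
-- def contar_repetidos(mano):
--     ranks = []
--     for carta in mano:
--         if carta[0] not in ranks:
--             ranks.append(carta[0])
--     return [[r, sum(1 for c in mano if c[0] == r)] for r in ranks]
-- ===== Notes on version B (the rewrite author's own statement) =====
-- stated objective: alternative
-- what changed: Replaces A's single-pass state machine that mutates a running counter table with a two-phase decomposition: first collect the distinct ranks in first-appearance order, then count each rank by a scan of the whole hand.
import Mathlib
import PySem

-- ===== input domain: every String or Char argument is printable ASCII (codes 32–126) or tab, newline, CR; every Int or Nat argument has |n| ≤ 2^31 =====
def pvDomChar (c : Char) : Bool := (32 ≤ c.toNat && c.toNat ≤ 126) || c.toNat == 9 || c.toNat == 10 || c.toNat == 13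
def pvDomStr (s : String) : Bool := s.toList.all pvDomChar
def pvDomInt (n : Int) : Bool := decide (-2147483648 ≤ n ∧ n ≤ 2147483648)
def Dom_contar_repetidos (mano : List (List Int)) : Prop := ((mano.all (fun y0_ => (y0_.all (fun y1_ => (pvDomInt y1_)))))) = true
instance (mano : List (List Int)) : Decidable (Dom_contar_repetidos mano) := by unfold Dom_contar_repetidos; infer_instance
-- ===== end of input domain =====

-- B replaces A's single-pass mutated counter table by a two-phase
-- collect-distinct-ranks-then-count decomposition (same cost, alternative structure).


-- ===== PORT A =====
-- inner 'for i in range(len(contador))' loop: increments every matching entry's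
-- count and records whether a match exists (existe)
def updA (c0 : Int) : List (List Int) → List (List Int) × Bool
  | [] => ([], false)
  | e :: rest =>
    let p := updA c0 rest
    match e with
    | a :: n :: t => if a = c0 then ((a :: (n + 1) :: t) :: p.1, true) else (e :: p.1, p.2)
    | _ => (e :: p.1, p.2)

-- one iteration of the outer 'for carta in mano' loop
def stepA (contador : List (List Int)) (carta : List Int) : List (List Int) :=
  let c0 := carta.headD 0   -- carta[0] (Pre_ guarantees carta ≠ [])
  let p := updA c0 contador
  if p.2 then p.1 else p.1 ++ [[c0, 1]]

def contar_repetidos (mano : List (List Int)) : List (List Int) :=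
  mano.foldl stepA []

-- ===== PORT B =====
-- phase 1: distinct ranks in first-appearance order
def ranksB (mano : List (List Int)) : List Int :=
  mano.foldl (fun rs carta => if carta.headD 0 ∈ rs then rs else rs ++ [carta.headD 0]) []

-- sum(1 for c in mano if c[0] == r)
def cntB (mano : List (List Int)) (r : Int) : Int :=
  mano.foldl (fun acc c => if c.headD 0 = r then acc + 1 else acc) 0

def contar_repetidos_alt (mano : List (List Int)) : List (List Int) :=
  (ranksB mano).map (fun r => [r, cntB mano r])

-- ===== PRECONDITION & SPEC =====
-- Pre_ excludes hands containing an empty card, on which both Pythons raise IndexError at carta[0].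
def Pre_contar_repetidos (mano : List (List Int)) : Prop := ∀ c ∈ mano, c ≠ []
instance (mano : List (List Int)) : Decidable (Pre_contar_repetidos mano) := by unfold Pre_contar_repetidos; infer_instance

def pvWitness_contar_repetidos : List (List Int) := [[7, 1], [3, 2], [7, 0]]

def Spec_contar_repetidos (mano : List (List Int)) (out : List (List Int)) : Prop := out = contar_repetidos_alt mano
instance (mano : List (List Int)) (out : List (List Int)) : Decidable (Spec_contar_repetidos mano out) := by unfold Spec_contar_repetidos; infer_instance

-- ===== CLAIM (what is proved, stated in full; the proofs are below) =====
def Claim_equal_contar_repetidos : Prop := ∀ (mano : List (List Int)), Dom_contar_repetidos mano → Pre_contar_repetidos mano → Spec_contar_repetidos mano (contar_repetidos mano)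

-- ===== LEMMAS AND PROOFS =====

theorem updA_map (c0 : Int) (rs : List Int) (f : Int → Int) :
    updA c0 (rs.map (fun r => [r, f r])) =
      (rs.map (fun r => [r, if r = c0 then f r + 1 else f r]), decide (c0 ∈ rs)) := by
  induction rs with
  | nil => simp [updA]
  | cons a t ih =>
    simp only [List.map_cons, updA, ih]
    by_cases h : a = c0
    · simp [h]
    · have h' : ¬ c0 = a := fun hc => h hc.symm
      simp [h, h']

theorem cntB_append (mano : List (List Int)) (c : List Int) (r : Int) :
    cntB (mano ++ [c]) r = if c.headD 0 = r then cntB mano r + 1 else cntB mano r := by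
  simp [cntB, List.foldl_append]

theorem ranksB_append (mano : List (List Int)) (c : List Int) :
    ranksB (mano ++ [c]) =
      if c.headD 0 ∈ ranksB mano then ranksB mano else ranksB mano ++ [c.headD 0] := by
  simp [ranksB, List.foldl_append]

theorem cntB_zero (mano : List (List Int)) (r : Int) (h : r ∉ ranksB mano) :
    cntB mano r = 0 := by
  induction mano using List.reverseRecOn with
  | nil => rfl
  | append_singleton ys c ih =>
    rw [ranksB_append] at h
    rw [cntB_append]
    by_cases hm : c.headD 0 ∈ ranksB ys
    · rw [if_pos hm] at h
      have hne : c.headD 0 ≠ r := fun he => h (he ▸ hm)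
      rw [if_neg hne]
      exact ih h
    · rw [if_neg hm] at h
      have h1 : r ∉ ranksB ys := fun hr => h (List.mem_append.2 (Or.inl hr))
      have hne : c.headD 0 ≠ r := fun he => h (List.mem_append.2 (Or.inr (he ▸ List.mem_singleton_self _)))
      rw [if_neg hne]
      exact ih h1

theorem contar_eq (mano : List (List Int)) :
    contar_repetidos mano = (ranksB mano).map (fun r => [r, cntB mano r]) := by
  induction mano using List.reverseRecOn with
  | nil => rfl
  | append_singleton ys c ih =>
    have hstep : contar_repetidos (ys ++ [c]) = stepA (contar_repetidos ys) c := by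
      simp [contar_repetidos, List.foldl_append]
    rw [hstep, ih, ranksB_append]
    simp only [stepA, updA_map]
    by_cases hm : c.headD 0 ∈ ranksB ys
    · simp only [hm, decide_true, if_true]
      apply List.map_congr_left
      intro r _
      rw [cntB_append]
      by_cases h : r = c.headD 0
      · rw [if_pos h, if_pos h.symm]
      · rw [if_neg h, if_neg (fun he => h he.symm)]
    · simp only [hm, decide_false, Bool.false_eq_true, if_false, List.map_append, List.map_cons, List.map_nil]
      congr 1
      · apply List.map_congr_left
        intro r hr
        have hne : r ≠ c.headD 0 := fun he => hm (he ▸ hr)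
        rw [cntB_append, if_neg hne, if_neg (fun he => hne he.symm)]
      · rw [cntB_append, if_pos rfl, cntB_zero ys (c.headD 0) hm]
        norm_num

-- ===== VERDICT (by name: the statement is the Claim_ definition above) =====
theorem contar_repetidos_spec : Claim_equal_contar_repetidos := by
  intro mano _ _
  unfold Spec_contar_repetidos contar_repetidos_alt
  exact contar_eq mano
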